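-- pv_equiv track=rewrite | github.com/declare-lab/HyperRED | models/joint_decoding/q_classifier.py | decode_nonzero_spans
-- ===== SOURCE A (Python) =====
-- from typing import List, Tuple
--
-- def decode_nonzero_spans(labels: List[int]) -> List[Tuple[int, int]]:
--     i = -1
--     spans = []
--
--     for j, x in enumerate(labels):
--         assert isinstance(x, int)
--         if x == 0 and i != -1:
--             assert 0 <= i < j
--             assert j <= len(labels)
--             spans.append((i, j))
--             i = -1
--         elif x != 0 and i == -1:
--             i = j
--
--     if i != -1:
--         spans.append((i, len(labels)))
--     assert len(set(spans)) == len(spans)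
--     return spans
-- ===== SOURCE B (Python) =====
-- from typing import List, Tuple
--
-- def decode_nonzero_spans(labels: List[int]) -> List[Tuple[int, int]]:
--     for x in labels:
--         assert isinstance(x, int)
--     prev = [0] + labels[:-1]          # element before each position (virtual 0 in front)
--     nxt = labels[1:] + [0]            # element after each position (virtual 0 at the end)
--     starts = [j for j, (p, x) in enumerate(zip(prev, labels)) if x != 0 and p == 0]
--     ends = [j + 1 for j, (x, q) in enumerate(zip(labels, nxt)) if x != 0 and q == 0]
--     return list(zip(starts, ends))
-- ===== Notes on version B (the rewrite author's own statement) =====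
-- stated objective: alternative
-- what changed: Replaces A's stateful pending-start accumulator loop with boundary detection: zip each element with its virtual-zero-padded neighbours, collect zero->nonzero transition indices as starts and nonzero->zero transitions as ends, and zip them into spans.
import Mathlib
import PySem

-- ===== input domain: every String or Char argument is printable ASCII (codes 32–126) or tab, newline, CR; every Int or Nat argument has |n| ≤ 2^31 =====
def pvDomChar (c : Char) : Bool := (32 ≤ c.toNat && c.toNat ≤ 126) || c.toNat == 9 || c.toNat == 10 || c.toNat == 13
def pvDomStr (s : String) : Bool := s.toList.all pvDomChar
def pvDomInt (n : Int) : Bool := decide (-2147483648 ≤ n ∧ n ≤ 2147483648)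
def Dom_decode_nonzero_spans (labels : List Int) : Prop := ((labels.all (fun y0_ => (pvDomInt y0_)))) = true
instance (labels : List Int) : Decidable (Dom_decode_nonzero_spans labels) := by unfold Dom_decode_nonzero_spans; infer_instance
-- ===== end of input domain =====

-- B replaces A's stateful pending-start loop with neighbour-zip boundary detection; same value on all Int lists (A's asserts never fire on Int input).

-- ===== PORT A =====
-- one step of A's for-loop body (state = (i, spans), visiting (x, j))
def pvStepA (st : Int × List (Int × Int)) (p : Int × Nat) : Int × List (Int × Int) :=
  if p.1 = 0 ∧ st.1 ≠ -1 then (-1, st.2 ++ [(st.1, (p.2 : Int))])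
  else if p.1 ≠ 0 ∧ st.1 = -1 then ((p.2 : Int), st.2)
  else st

-- A's asserts (isinstance, index bounds, span distinctness) always hold on a List Int input, so they are no-ops here.
def decode_nonzero_spans (labels : List Int) : List (Int × Int) :=
  let st := labels.zipIdx.foldl pvStepA (-1, [])
  if st.1 ≠ -1 then st.2 ++ [(st.1, (labels.length : Int))] else st.2

-- ===== PORT B =====
def decode_nonzero_spans_alt (labels : List Int) : List (Int × Int) :=
  let prev := 0 :: labels.dropLast        -- [0] + labels[:-1]
  let nxt := labels.drop 1 ++ [0]         -- labels[1:] + [0]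
  let starts := ((prev.zip labels).zipIdx).filterMap
    (fun q => if q.1.2 ≠ 0 ∧ q.1.1 = 0 then some ((q.2 : Int)) else none)
  let ends := ((labels.zip nxt).zipIdx).filterMap
    (fun q => if q.1.1 ≠ 0 ∧ q.1.2 = 0 then some ((q.2 : Int) + 1) else none)
  starts.zip ends

-- ===== PRECONDITION & SPEC =====
def Spec_decode_nonzero_spans (labels : List Int) (out : List (Int × Int)) : Prop := out = decode_nonzero_spans_alt labels
instance (labels : List Int) (out : List (Int × Int)) : Decidable (Spec_decode_nonzero_spans labels out) := by unfold Spec_decode_nonzero_spans; infer_instance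

-- ===== CLAIM (what is proved, stated in full; the proofs are below) =====
def Claim_equal_decode_nonzero_spans : Prop := ∀ (labels : List Int), Dom_decode_nonzero_spans labels → Spec_decode_nonzero_spans labels (decode_nonzero_spans labels)

-- ===== LEMMAS AND PROOFS =====

-- common recursive characterisation of A's loop: k = current index, i = pending start (-1 = none)
def pvF (k i : Int) : List Int → List (Int × Int)
  | [] => if i ≠ -1 then [(i, k)] else []
  | x :: r =>
    if x = 0 then
      (if i ≠ -1 then (i, k) :: pvF (k + 1) (-1) r else pvF (k + 1) (-1) r)
    else
      (if i = -1 then pvF (k + 1) k r else pvF (k + 1) i r)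

-- start indices of nonzero runs; pz = "previous element is zero"
def pvStarts (k : Int) (pz : Bool) : List Int → List Int
  | [] => []
  | x :: r => (if x ≠ 0 ∧ pz then [k] else []) ++ pvStarts (k + 1) (x == 0) r

-- end indices (exclusive) of nonzero runs
def pvEnds (k : Int) : List Int → List Int
  | [] => []
  | [x] => if x ≠ 0 then [k + 1] else []
  | x :: y :: r => (if x ≠ 0 ∧ y = 0 then [k + 1] else []) ++ pvEnds (k + 1) (y :: r)

lemma pvEnds_zero (k : Int) (r : List Int) : pvEnds k (0 :: r) = pvEnds (k + 1) r := by
  cases r <;> simp [pvEnds]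

lemma pvEnds_congr (k x y : Int) (r : List Int) (hx : x ≠ 0) (hy : y ≠ 0) :
    pvEnds k (x :: r) = pvEnds k (y :: r) := by
  cases r <;> simp [pvEnds, hx, hy]

lemma pv_main : ∀ (ls : List Int) (k : Int), 0 ≤ k →
    (pvF k (-1) ls = (pvStarts k true ls).zip (pvEnds k ls)) ∧
    (∀ i : Int, i ≠ -1 →
      pvF k i ls = ((i :: pvStarts k false ls)).zip (pvEnds (k - 1) (1 :: ls))) := by
  intro ls
  induction ls with
  | nil =>
    intro k hk
    refine ⟨by simp [pvF, pvStarts, pvEnds], ?_⟩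
    intro i hi
    simp [pvF, pvStarts, pvEnds, hi]
  | cons x r ih =>
    intro k hk
    have hk1 : (0:Int) ≤ k + 1 := by omega
    constructor
    · by_cases hx : x = 0
      · subst hx
        simp only [pvF, if_neg (by simp : ¬ (-1:Int) ≠ -1)]
        rw [(ih (k+1) hk1).1, pvEnds_zero]
        simp [pvStarts]
      · have hkne : k ≠ -1 := by omega
        simp only [pvF, if_neg hx]
        rw [(ih (k+1) hk1).2 k hkne]
        have : pvEnds (k + 1 - 1) (1 :: r) = pvEnds k (x :: r) := by
          have := pvEnds_congr k 1 x r (by norm_num) hx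
          rw [show k + 1 - 1 = k by ring, this]
        rw [this]
        have hb : (x == 0) = false := by simpa using hx
        simp [pvStarts, hx, hb]
    · intro i hi
      by_cases hx : x = 0
      · subst hx
        simp only [pvF, if_pos hi]
        rw [(ih (k+1) hk1).1]
        have h1 : pvEnds (k - 1) (1 :: 0 :: r) = (k - 1 + 1) :: pvEnds (k - 1 + 1) (0 :: r) := by
          simp [pvEnds]
        rw [h1, pvEnds_zero]
        have : k - 1 + 1 = k := by ring
        rw [this]
        simp [pvStarts]
      · simp only [pvF, if_neg hx, if_neg (by simpa using hi)]
        rw [(ih (k+1) hk1).2 i hi]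
        have h1 : pvEnds (k - 1) (1 :: x :: r) = pvEnds (k - 1 + 1) (x :: r) := by
          simp [pvEnds, hx]
        have h2 : pvEnds (k - 1 + 1) (x :: r) = pvEnds (k + 1 - 1) (1 :: r) := by
          have := pvEnds_congr (k - 1 + 1) x 1 r hx (by norm_num)
          rw [this]; norm_num
        rw [h1, h2]
        have hb : (x == 0) = false := by simpa using hx
        simp [pvStarts, hx, hb]

-- A's loop from an arbitrary state equals spans ++ pvF
lemma pvA_loop : ∀ (ls : List Int) (k : Nat) (i : Int) (spans : List (Int × Int)),
    (let st := (ls.zipIdx k).foldl pvStepA (i, spans)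
     if st.1 ≠ -1 then st.2 ++ [(st.1, ((k + ls.length : Nat) : Int))] else st.2)
    = spans ++ pvF (k : Int) i ls := by
  intro ls
  induction ls with
  | nil =>
    intro k i spans
    by_cases hi : i = -1 <;> simp [pvF, hi]
  | cons x r ih =>
    intro k i spans
    have harith : (k + (x :: r).length : Nat) = ((k + 1) + r.length : Nat) := by
      simp [List.length_cons]; omega
    simp only [List.zipIdx_cons, List.foldl_cons, harith]
    by_cases hx : x = 0
    · by_cases hi : i = -1
      · have hstep : pvStepA (i, spans) (x, k) = (i, spans) := by
          simp [pvStepA, hx, hi]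
        rw [hstep, ih (k+1) i spans]
        simp [pvF, hx, hi]
      · have hstep : pvStepA (i, spans) (x, k) = (-1, spans ++ [(i, (k : Int))]) := by
          simp [pvStepA, hx, hi]
        rw [hstep, ih (k+1) (-1) (spans ++ [(i, (k : Int))])]
        simp [pvF, hx, hi]
    · by_cases hi : i = -1
      · have hstep : pvStepA (i, spans) (x, k) = ((k : Int), spans) := by
          simp [pvStepA, hx, hi]
        rw [hstep, ih (k+1) (k : Int) spans]
        simp [pvF, hx, hi]
      · have hstep : pvStepA (i, spans) (x, k) = (i, spans) := by
          simp [pvStepA, hx, hi]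
        rw [hstep, ih (k+1) i spans]
        simp [pvF, hx, hi]

lemma pv_dropLast_zip (x : Int) (r : List Int) :
    ((x :: r).dropLast).zip r = (x :: r.dropLast).zip r := by
  cases r <;> simp [List.dropLast]

lemma pv_startsZip : ∀ (ls : List Int) (p : Int) (k : Nat),
    (((p :: ls.dropLast).zip ls).zipIdx k).filterMap
      (fun q => if q.1.2 ≠ 0 ∧ q.1.1 = 0 then some ((q.2 : Int)) else none)
    = pvStarts (k : Int) (p == 0) ls := by
  intro ls
  induction ls with
  | nil => intro p k; simp [pvStarts]
  | cons x r ih =>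
    intro p k
    rw [show (p :: (x :: r).dropLast).zip (x :: r) = (p, x) :: ((x :: r).dropLast).zip r by simp,
        pv_dropLast_zip, List.zipIdx_cons, List.filterMap_cons]
    by_cases hcond : x ≠ 0 ∧ p = 0
    · simp only [if_pos hcond]
      rw [ih x (k+1)]
      simp [pvStarts, hcond.1, hcond.2]
    · simp only [if_neg hcond]
      rw [ih x (k+1)]
      by_cases hp : p = 0
      · have hx : x = 0 := by by_contra h; exact hcond ⟨h, hp⟩
        simp [pvStarts, hp, hx]
      · simp [pvStarts, hp]

lemma pv_endsZip : ∀ (ls : List Int) (k : Nat),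
    ((ls.zip (ls.drop 1 ++ [0])).zipIdx k).filterMap
      (fun q => if q.1.1 ≠ 0 ∧ q.1.2 = 0 then some ((q.2 : Int) + 1) else none)
    = pvEnds (k : Int) ls := by
  intro ls
  induction ls with
  | nil => intro k; simp [pvEnds]
  | cons x r ih =>
    intro k
    cases r with
    | nil =>
      by_cases hx : x = 0 <;> simp [pvEnds, hx]
    | cons y s =>
      rw [show ((x :: y :: s).zip (((x :: y :: s).drop 1) ++ [0]))
            = (x, y) :: ((y :: s).zip (((y :: s).drop 1) ++ [0])) by simp,
          List.zipIdx_cons, List.filterMap_cons]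
      rw [ih (k+1)]
      by_cases hcond : x ≠ 0 ∧ y = 0
      · simp [pvEnds, hcond.1, hcond.2]
      · by_cases hx : x = 0
        · simp [pvEnds, hx]
        · have hy : y ≠ 0 := by by_contra h; exact hcond ⟨hx, by simpa using h⟩
          simp [pvEnds, hx, hy]

-- ===== VERDICT (by name: the statement is the Claim_ definition above) =====
theorem decode_nonzero_spans_spec : Claim_equal_decode_nonzero_spans := by
  intro labels _
  unfold Spec_decode_nonzero_spans
  have hA : decode_nonzero_spans labels = pvF 0 (-1) labels := by
    have := pvA_loop labels 0 (-1) []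
    simpa [decode_nonzero_spans] using this
  have hS := pv_startsZip labels 0 0
  have hE := pv_endsZip labels 0
  have hB : decode_nonzero_spans_alt labels
      = (pvStarts 0 true labels).zip (pvEnds 0 labels) := by
    simp only [decode_nonzero_spans_alt]
    rw [hS, hE]
    norm_num
  rw [hA, hB, (pv_main labels 0 (by norm_num)).1]
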